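-- pv_equiv track=rewrite | github.com/Junyeong9965/3DCTS | scripts_openroad/generate_3d_views.py | split_verilog_statements
-- ===== SOURCE A (Python) =====
-- from typing import Dict, List, Tuple, Optional
--
-- def split_verilog_statements(text: str) -> List[Tuple[int, int]]:
--     """
--     Split Verilog into top-level statements by ';' while tracking parentheses depth and strings.
--     Returns list of (start,end) spans in the original text (end includes ';').
--     """
--     spans: List[Tuple[int, int]] = []
--     depth = 0
--     in_str = False
--     esc = False
--     start = 0
--     i = 0
--     n = len(text)
--     while i < n:
--         c = text[i]
--         if in_str:
--             if esc:
--                 esc = False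
--             elif c == "\\":
--                 esc = True
--             elif c == '"':
--                 in_str = False
--             i += 1
--             continue
--
--         if c == '"':
--             in_str = True
--             i += 1
--             continue
--
--         if c == "(":
--             depth += 1
--         elif c == ")":
--             if depth > 0:
--                 depth -= 1
--         elif c == ";" and depth == 0:
--             spans.append((start, i + 1))
--             start = i + 1
--         i += 1
--
--     if start < n:
--         spans.append((start, n))
--     return spans
-- ===== SOURCE B (Python) =====
-- def split_verilog_statements(text):
--     """Staged passes: (1) blank out string literals into a masked copy,
--     (2) collect top-level semicolon cut positions over the masked text,
--     (3) assemble spans by zipping the cut list."""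
--     n = len(text)
--     # Pass 1: blank out string literals (quotes, contents, escape pairs)
--     chars = list(text)
--     i = 0
--     while i < n:
--         if chars[i] == '"':
--             chars[i] = ' '
--             i += 1
--             while i < n:
--                 if chars[i] == '\\':
--                     chars[i] = ' '
--                     if i + 1 < n:
--                         chars[i + 1] = ' '
--                     i += 2
--                 elif chars[i] == '"':
--                     chars[i] = ' '
--                     i += 1
--                     break
--                 else:
--                     chars[i] = ' '
--                     i += 1
--         else:
--             i += 1
--     # Pass 2: positions just after each top-level semicolon
--     cuts = []
--     depth = 0
--     for j, c in enumerate(chars):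
--         if c == '(':
--             depth += 1
--         elif c == ')':
--             if depth > 0:
--                 depth -= 1
--         elif c == ';' and depth == 0:
--             cuts.append(j + 1)
--     # Pass 3: assemble spans from the cut list
--     bounds = [0] + cuts
--     spans = list(zip(bounds, cuts))
--     if bounds[-1] < n:
--         spans.append((bounds[-1], n))
--     return spans
-- ===== Notes on version B (the rewrite author's own statement) =====
-- stated objective: alternative
-- what changed: B replaces A's single stateful scan (depth/in_str/esc flags) with three staged passes: blank out string literals into a masked copy of the text, then collect top-level semicolon cut positions over the masked text, then assemble the spans by zipping the cut list with itself shifted by the start bound.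
import Mathlib
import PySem

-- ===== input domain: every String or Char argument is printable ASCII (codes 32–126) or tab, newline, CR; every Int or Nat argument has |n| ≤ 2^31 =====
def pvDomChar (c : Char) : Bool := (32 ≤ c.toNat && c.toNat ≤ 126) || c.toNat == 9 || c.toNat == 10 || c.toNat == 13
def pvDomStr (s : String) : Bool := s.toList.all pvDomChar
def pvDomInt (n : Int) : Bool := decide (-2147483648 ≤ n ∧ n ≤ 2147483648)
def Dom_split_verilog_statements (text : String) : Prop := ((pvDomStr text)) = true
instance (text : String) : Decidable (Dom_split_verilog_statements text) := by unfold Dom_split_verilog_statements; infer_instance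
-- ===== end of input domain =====

-- B replaces A's single stateful scan with three staged passes (mask strings, collect
-- cut positions, zip spans together); objective: alternative, same O(n) cost.

-- ===== PORT A =====
-- A's while-loop: state (spans, depth, in_str, esc, start), one character per step.
def svsALoop (cs : List Char) (i : Int) (spans : List (Int × Int)) (depth : Int)
    (inStr esc : Bool) (start : Int) : List (Int × Int) × Int :=
  match cs with
  | [] => (spans, start)
  | c :: rest =>
    if inStr then
      if esc then svsALoop rest (i + 1) spans depth inStr false start
      else if c = '\\' then svsALoop rest (i + 1) spans depth inStr true start
      else if c = '"' then svsALoop rest (i + 1) spans depth false esc start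
      else svsALoop rest (i + 1) spans depth inStr esc start
    else if c = '"' then svsALoop rest (i + 1) spans depth true esc start
    else if c = '(' then svsALoop rest (i + 1) spans (depth + 1) inStr esc start
    else if c = ')' then
      svsALoop rest (i + 1) spans (if depth > 0 then depth - 1 else depth) inStr esc start
    else if c = ';' ∧ depth = 0 then
      svsALoop rest (i + 1) (spans ++ [(start, i + 1)]) depth inStr esc (i + 1)
    else svsALoop rest (i + 1) spans depth inStr esc start

def split_verilog_statements (text : String) : List (Int × Int) :=
  let cs := text.toList
  let n : Int := cs.length
  let p := svsALoop cs 0 [] 0 false false 0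
  if p.2 < n then p.1 ++ [(p.2, n)] else p.1

-- ===== PORT B =====
-- Pass 1 of Source B: blank out string literals with spaces (bMask = outer loop,
-- bMaskStr = the inner loop inside a string literal, skip-two on a backslash).
mutual
def bMask (cs : List Char) : List Char :=
  match cs with
  | [] => []
  | c :: rest => if c = '"' then ' ' :: bMaskStr rest else c :: bMask rest

def bMaskStr (cs : List Char) : List Char :=
  match cs with
  | [] => []
  | c :: rest =>
    if c = '\\' then
      match rest with
      | [] => [' ']
      | _ :: rest' => ' ' :: ' ' :: bMaskStr rest'
    else if c = '"' then ' ' :: bMask rest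
    else ' ' :: bMaskStr rest
end

-- Pass 2 of Source B: the for-loop collecting positions just after each top-level ';'.
def bCuts (cs : List Char) (j depth : Int) (acc : List Int) : List Int :=
  match cs with
  | [] => acc
  | c :: rest =>
    if c = '(' then bCuts rest (j + 1) (depth + 1) acc
    else if c = ')' then bCuts rest (j + 1) (if depth > 0 then depth - 1 else depth) acc
    else if c = ';' ∧ depth = 0 then bCuts rest (j + 1) depth (acc ++ [j + 1])
    else bCuts rest (j + 1) depth acc

def split_verilog_statements_alt (text : String) : List (Int × Int) :=
  let cs := text.toList
  let n : Int := cs.length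
  let masked := bMask cs
  let cuts := bCuts masked 0 0 []
  let bounds : List Int := 0 :: cuts
  let spans := List.zip bounds cuts
  if bounds.getLastD 0 < n then spans ++ [(bounds.getLastD 0, n)] else spans

-- ===== PRECONDITION & SPEC =====
def Spec_split_verilog_statements (text : String) (out : List (Int × Int)) : Prop := out = split_verilog_statements_alt text
instance (text : String) (out : List (Int × Int)) : Decidable (Spec_split_verilog_statements text out) := by unfold Spec_split_verilog_statements; infer_instance

-- ===== CLAIM =====
def Claim_equal_split_verilog_statements : Prop := ∀ (text : String), Dom_split_verilog_statements text → Spec_split_verilog_statements text (split_verilog_statements text)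

-- ===== LEMMAS AND PROOFS =====

-- spans that A accumulates, as a function of the cut list
def chainSpans (start : Int) (cuts : List Int) : List (Int × Int) :=
  match cuts with
  | [] => []
  | c :: rest => (start, c) :: chainSpans c rest

theorem chainSpans_zip : ∀ (C : List Int) (start : Int),
    chainSpans start C = List.zip (start :: C) C := by
  intro C
  induction C with
  | nil => intro start; simp [chainSpans]
  | cons c rest ih => intro start; simp [chainSpans, ih c, List.zip]

theorem bCuts_acc : ∀ (cs : List Char) (j d : Int) (acc : List Int),
    bCuts cs j d acc = acc ++ bCuts cs j d [] := by
  intro cs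
  induction cs with
  | nil => intro j d acc; simp [bCuts]
  | cons c rest ih =>
    intro j d acc
    simp only [bCuts]
    split_ifs
    all_goals try exact ih _ _ _
    rw [ih _ _ (acc ++ [j + 1]), ih _ _ ([] ++ [j + 1])]
    simp

theorem mask_no_quote : ∀ (k : Nat) (cs : List Char), cs.length ≤ k →
    '"' ∉ bMask cs ∧ '"' ∉ bMaskStr cs := by
  intro k
  induction k with
  | zero =>
    intro cs hlen
    have : cs = [] := List.eq_nil_of_length_eq_zero (Nat.le_zero.mp hlen)
    subst this; simp [bMask, bMaskStr]
  | succ k ih =>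
    intro cs hlen
    match cs with
    | [] => simp [bMask, bMaskStr]
    | c :: rest =>
      simp only [List.length_cons, Nat.succ_le_succ_iff] at hlen
      constructor
      · by_cases hc : c = '"'
        · simp [bMask, hc, (ih rest hlen).2]
        · simp only [bMask, if_neg hc, List.mem_cons, not_or]
          exact ⟨fun h => hc h.symm, (ih rest hlen).1⟩
      · by_cases hb : c = '\\'
        · rcases rest with _ | ⟨x, rest'⟩
          · simp [bMaskStr, hb]
          · have hlen' : rest'.length ≤ k := by
              simp only [List.length_cons] at hlen; omega
            simp [bMaskStr, hb, (ih rest' hlen').2]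
        · by_cases hc : c = '"'
          · rw [bMaskStr.eq_def]
            simp [hc, (ih rest hlen).1]
          · rw [bMaskStr.eq_def]
            simp [hb, hc, (ih rest hlen).2]

-- On quote-free text A's loop computes exactly B's cut list, chained into spans.
theorem svsA_pure : ∀ (cs : List Char), '"' ∉ cs →
    ∀ (i : Int) (spans : List (Int × Int)) (d start : Int),
    svsALoop cs i spans d false false start
      = (spans ++ chainSpans start (bCuts cs i d []),
         (bCuts cs i d []).getLastD start) := by
  intro cs
  induction cs with
  | nil => intro _ i spans d start; simp [svsALoop, bCuts, chainSpans]
  | cons c rest ih =>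
    intro hq i spans d start
    simp only [List.mem_cons, not_or] at hq
    obtain ⟨hc, hrest⟩ := hq
    have hc' : ¬ c = '"' := fun h => hc h.symm
    by_cases h1 : c = '('
    · simp [svsALoop, bCuts, h1, ih hrest]
    · by_cases h2 : c = ')'
      · simp [svsALoop, bCuts, h2, ih hrest]
      · by_cases h3 : c = ';' ∧ d = 0
        · obtain ⟨hs, hd⟩ := h3
          subst hs
          subst hd
          simp only [svsALoop, bCuts]
          simp [ih hrest, bCuts_acc rest (i + 1) 0 [i + 1], chainSpans,
            ← List.getLastD_eq_getLast?, List.getLastD_cons]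
        · simp [svsALoop, bCuts, hc', h1, h2, h3, ih hrest]

-- A run on the original text equals A run on the masked text (masking preserves
-- positions; the final index argument is never part of the result).
theorem svsA_mask : ∀ (k : Nat) (cs : List Char), cs.length ≤ k →
    ∀ (i : Int) (spans : List (Int × Int)) (d start : Int),
      (svsALoop cs i spans d false false start
        = svsALoop (bMask cs) i spans d false false start) ∧
      (svsALoop cs i spans d true false start
        = svsALoop (bMaskStr cs) i spans d false false start) := by
  intro k
  induction k with
  | zero =>
    intro cs hlen i spans d start
    have : cs = [] := List.eq_nil_of_length_eq_zero (Nat.le_zero.mp hlen)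
    subst this; simp [bMask, bMaskStr, svsALoop]
  | succ k ih =>
    intro cs hlen i spans d start
    match cs with
    | [] => simp [bMask, bMaskStr, svsALoop]
    | c :: rest =>
      simp only [List.length_cons, Nat.succ_le_succ_iff] at hlen
      have IH := ih rest hlen
      constructor
      · by_cases hc : c = '"'
        · simp [bMask, hc, svsALoop, IH]
        · simp [bMask, hc, svsALoop, IH]
      · by_cases hb : c = '\\'
        · rcases rest with _ | ⟨x, rest'⟩
          · simp [bMaskStr, hb, svsALoop]
          · have hlen' : rest'.length ≤ k := by
              simp only [List.length_cons] at hlen; omega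
            have IH' := ih rest' hlen'
            simp [bMaskStr, hb, svsALoop, IH']
        · by_cases hc : c = '"'
          · rw [bMaskStr.eq_def]
            simp [hc, svsALoop, IH]
          · rw [bMaskStr.eq_def]
            simp [hb, hc, svsALoop, IH]

-- ===== VERDICT =====
theorem split_verilog_statements_spec : Claim_equal_split_verilog_statements := by
  intro text _
  unfold Spec_split_verilog_statements split_verilog_statements split_verilog_statements_alt
  simp only []
  rw [(svsA_mask text.toList.length text.toList le_rfl 0 [] 0 0).1,
      svsA_pure (bMask text.toList)
        (mask_no_quote text.toList.length text.toList le_rfl).1 0 [] 0 0]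
  simp only [chainSpans_zip, List.getLastD_cons, List.nil_append]
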